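-- pv_equiv track=rewrite | github.com/DavidHuber-NOAA/wiki-automation | generate_weekly_summary.py | generate_commit_themes
-- ===== SOURCE A (Python) =====
-- from collections import defaultdict
--
-- def generate_commit_themes(commit_messages):
--     """Extract themes from commit messages."""
--     themes = defaultdict(list)
--
--     for repo, messages in commit_messages.items():
--         repo_short = repo.split('/')[-1]
--         for msg in messages:
--             msg_lower = msg.lower()
--             # Simple keyword extraction
--             if any(kw in msg_lower for kw in ['fix', 'bug', 'error', 'issue']):
--                 themes['Bug Fixes'].append(f"{repo_short}: {msg}")
--             elif any(kw in msg_lower for kw in ['add', 'new', 'implement', 'create']):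
--                 themes['New Features'].append(f"{repo_short}: {msg}")
--             elif any(kw in msg_lower for kw in ['update', 'change', 'modify', 'refactor']):
--                 themes['Updates'].append(f"{repo_short}: {msg}")
--             elif any(kw in msg_lower for kw in ['doc', 'readme', 'comment']):
--                 themes['Documentation'].append(f"{repo_short}: {msg}")
--             elif any(kw in msg_lower for kw in ['test', 'ci', 'build']):
--                 themes['CI/Testing'].append(f"{repo_short}: {msg}")
--             else:
--                 themes['Other Changes'].append(f"{repo_short}: {msg}")
--
--     return themes
-- ===== SOURCE B (Python) =====
-- from collections import defaultdict
--
-- _THEMES = [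
--     ('Bug Fixes', ('fix', 'bug', 'error', 'issue')),
--     ('New Features', ('add', 'new', 'implement', 'create')),
--     ('Updates', ('update', 'change', 'modify', 'refactor')),
--     ('Documentation', ('doc', 'readme', 'comment')),
--     ('CI/Testing', ('test', 'ci', 'build')),
-- ]
--
--
-- def generate_commit_themes(commit_messages):
--     """Extract themes from commit messages."""
--     lines = [(f"{repo.split('/')[-1]}: {msg}", msg.lower())
--              for repo, messages in commit_messages.items()
--              for msg in messages]
--     # Theme-major sieve: each theme pass claims the still-unlabeled lines
--     # that match one of its keywords; no line is ever classified twice.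
--     labels = {}
--     remaining = list(enumerate(lines))
--     for name, kws in _THEMES:
--         still = []
--         for i, (line, low) in remaining:
--             if any(kw in low for kw in kws):
--                 labels[i] = name
--             else:
--                 still.append((i, (line, low)))
--         remaining = still
--     # Single grouping pass in original order; unclaimed lines fall through.
--     themes = defaultdict(list)
--     for i, (line, low) in enumerate(lines):
--         themes[labels.get(i, 'Other Changes')].append(line)
--     return themes
-- ===== Notes on version B (the rewrite author's own statement) =====
-- stated objective: alternative
-- what changed: Replaces the per-message six-way if/elif first-match classifier with a theme-major sieve: five passes over a shrinking worklist of still-unlabeled lines, each pass claiming the lines matching that theme's keywords into a label map, followed by one grouping pass in original order with 'Other Changes' as fall-through.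
import Mathlib
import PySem

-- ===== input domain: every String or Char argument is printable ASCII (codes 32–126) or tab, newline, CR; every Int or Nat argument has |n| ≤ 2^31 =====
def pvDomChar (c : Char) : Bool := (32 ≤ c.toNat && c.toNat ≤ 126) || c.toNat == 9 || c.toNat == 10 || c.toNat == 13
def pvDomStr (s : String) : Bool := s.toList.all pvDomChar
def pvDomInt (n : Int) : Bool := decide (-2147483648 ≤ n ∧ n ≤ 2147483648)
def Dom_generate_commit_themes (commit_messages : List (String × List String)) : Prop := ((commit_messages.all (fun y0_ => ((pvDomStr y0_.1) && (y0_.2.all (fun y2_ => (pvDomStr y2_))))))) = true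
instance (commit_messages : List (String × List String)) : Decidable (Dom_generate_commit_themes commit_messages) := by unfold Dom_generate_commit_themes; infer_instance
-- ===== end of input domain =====

-- B replaces A's per-message if/elif classifier with a theme-major sieve: five passes over a
-- shrinking worklist label the lines per theme, then one grouping pass (objective: alternative;
-- return value only).

-- ===== PORT A =====
-- one loop-body step of A: classify msg with the if/elif chain and append to the theme's list
def gctStepA (themes : PySem.Dict String (List String)) (repo msg : String) :
    PySem.Dict String (List String) :=
  let repo_short := PySem.List.pyGetD (((PySem.Str.split? repo "/").getD [])) (-1) ""
  let msg_lower := PySem.Str.lower msg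
  let entry := repo_short ++ ": " ++ msg
  if ["fix", "bug", "error", "issue"].any (fun kw => PySem.Str.isIn kw msg_lower) then
    themes.modify "Bug Fixes" [] (· ++ [entry])
  else if ["add", "new", "implement", "create"].any (fun kw => PySem.Str.isIn kw msg_lower) then
    themes.modify "New Features" [] (· ++ [entry])
  else if ["update", "change", "modify", "refactor"].any (fun kw => PySem.Str.isIn kw msg_lower) then
    themes.modify "Updates" [] (· ++ [entry])
  else if ["doc", "readme", "comment"].any (fun kw => PySem.Str.isIn kw msg_lower) then
    themes.modify "Documentation" [] (· ++ [entry])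
  else if ["test", "ci", "build"].any (fun kw => PySem.Str.isIn kw msg_lower) then
    themes.modify "CI/Testing" [] (· ++ [entry])
  else
    themes.modify "Other Changes" [] (· ++ [entry])

def generate_commit_themes (commit_messages : List (String × List String)) :
    List (String × List String) :=
  (commit_messages.foldl
      (fun themes rm => rm.2.foldl (fun themes msg => gctStepA themes rm.1 msg) themes)
      PySem.Dict.empty).items

-- ===== PORT B =====
def gctThemes : List (String × List String) :=
  [("Bug Fixes", ["fix", "bug", "error", "issue"]),
   ("New Features", ["add", "new", "implement", "create"]),
   ("Updates", ["update", "change", "modify", "refactor"]),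
   ("Documentation", ["doc", "readme", "comment"]),
   ("CI/Testing", ["test", "ci", "build"])]

-- f"{repo.split('/')[-1]}: {msg}"
def gctFmt (repo msg : String) : String :=
  PySem.List.pyGetD (((PySem.Str.split? repo "/").getD [])) (-1) "" ++ ": " ++ msg

-- the flat list of (formatted line, lowered message)
def gctLines (cm : List (String × List String)) : List (String × String) :=
  cm.flatMap (fun rm => rm.2.map (fun msg => (gctFmt rm.1 msg, PySem.Str.lower msg)))

-- one sieve pass: claim the matching worklist entries into the label dict, keep the rest
def gctPass (st : PySem.Dict Int String × List (Int × (String × String)))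
    (theme : String × List String) :
    PySem.Dict Int String × List (Int × (String × String)) :=
  st.2.foldl
    (fun acc p =>
      if theme.2.any (fun kw => PySem.Str.isIn kw p.2.2) then (acc.1.insert p.1 theme.1, acc.2)
      else (acc.1, acc.2 ++ [p]))
    (st.1, [])

def generate_commit_themes_alt (commit_messages : List (String × List String)) :
    List (String × List String) :=
  let lines := gctLines commit_messages
  let st := gctThemes.foldl gctPass (PySem.Dict.empty, PySem.List.enumerate lines)
  ((PySem.List.enumerate lines).foldl
      (fun th p => th.modify (st.1.getD p.1 "Other Changes") [] (· ++ [p.2.1]))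
      PySem.Dict.empty).items

-- ===== PRECONDITION & SPEC =====
def Spec_generate_commit_themes (commit_messages : List (String × List String)) (out : List (String × List String)) : Prop := out = generate_commit_themes_alt commit_messages
instance (commit_messages : List (String × List String)) (out : List (String × List String)) : Decidable (Spec_generate_commit_themes commit_messages out) := by unfold Spec_generate_commit_themes; infer_instance

-- ===== CLAIM (what is proved, stated in full; the proofs are below) =====
def Claim_equal_generate_commit_themes : Prop := ∀ (commit_messages : List (String × List String)), Dom_generate_commit_themes commit_messages → Spec_generate_commit_themes commit_messages (generate_commit_themes commit_messages)

-- ===== LEMMAS AND PROOFS =====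

-- the first-match classification, as a function of the lowered message
def gctCls (low : String) : String :=
  if ["fix", "bug", "error", "issue"].any (fun kw => PySem.Str.isIn kw low) then "Bug Fixes"
  else if ["add", "new", "implement", "create"].any (fun kw => PySem.Str.isIn kw low) then "New Features"
  else if ["update", "change", "modify", "refactor"].any (fun kw => PySem.Str.isIn kw low) then "Updates"
  else if ["doc", "readme", "comment"].any (fun kw => PySem.Str.isIn kw low) then "Documentation"
  else if ["test", "ci", "build"].any (fun kw => PySem.Str.isIn kw low) then "CI/Testing"
  else "Other Changes"

-- the common normal form both programs are reduced to
def gctCF (cm : List (String × List String)) : List (String × List String) :=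
  ((gctLines cm).foldl (fun th l => th.modify (gctCls l.2) [] (· ++ [l.1])) PySem.Dict.empty).items

-- ---- A-side reduction ----
theorem gctStepA_eq (themes : PySem.Dict String (List String)) (repo msg : String) :
    gctStepA themes repo msg =
      themes.modify (gctCls (PySem.Str.lower msg)) [] (· ++ [gctFmt repo msg]) := by
  simp only [gctStepA, gctCls, gctFmt]
  split_ifs <;> rfl

theorem gct_foldl_eq (f : PySem.Dict String (List String) → String → String →
      PySem.Dict String (List String)) (l : List (String × List String))
    (d : PySem.Dict String (List String)) :
    l.foldl (fun th rm => rm.2.foldl (fun th msg => f th rm.1 msg) th) d =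
      (l.flatMap (fun rm => rm.2.map (fun msg => (rm.1, msg)))).foldl
        (fun th p => f th p.1 p.2) d := by
  induction l generalizing d with
  | nil => rfl
  | cons rm rest ih =>
      simp only [List.flatMap_cons, List.foldl_append, List.foldl_cons, List.foldl_map, ih]

theorem gctLines_eq (cm : List (String × List String)) :
    gctLines cm =
      (cm.flatMap (fun rm => rm.2.map (fun msg => (rm.1, msg)))).map
        (fun p => (gctFmt p.1 p.2, PySem.Str.lower p.2)) := by
  simp [gctLines, List.map_flatMap, Function.comp_def]

theorem gctA_eq_CF (cm : List (String × List String)) : generate_commit_themes cm = gctCF cm := by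
  unfold generate_commit_themes gctCF
  rw [gct_foldl_eq gctStepA, gctLines_eq, List.foldl_map]
  congr 1
  apply PySem.List.foldl_congr_mem
  intro acc x _
  exact gctStepA_eq acc x.1 x.2

-- ---- B-side reduction ----

-- a sieve pass splits the worklist: matched entries are inserted, the rest survive in order
theorem gctPass_foldl (t : String × List String) (u : List (Int × (String × String)))
    (d : PySem.Dict Int String) (ys : List (Int × (String × String))) :
    u.foldl
      (fun acc p =>
        if t.2.any (fun kw => PySem.Str.isIn kw p.2.2) then (acc.1.insert p.1 t.1, acc.2)
        else (acc.1, acc.2 ++ [p]))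
      (d, ys) =
      ((u.filter (fun p => t.2.any (fun kw => PySem.Str.isIn kw p.2.2))).foldl
          (fun d p => d.insert p.1 t.1) d,
        ys ++ u.filter (fun p => !t.2.any (fun kw => PySem.Str.isIn kw p.2.2))) := by
  induction u generalizing d ys with
  | nil => simp
  | cons p rest ih =>
      rw [List.foldl_cons]
      cases h : (t.2.any fun kw => PySem.Str.isIn kw p.2.2) with
      | true =>
          rw [if_pos rfl, ih]
          simp only [List.filter_cons, h, Bool.not_true, Bool.false_eq_true, if_false,
            if_true, List.foldl_cons]
      | false =>
          rw [if_neg Bool.false_ne_true, ih]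
          simp only [List.filter_cons, h, Bool.not_false, Bool.false_eq_true, if_false,
            if_true, List.append_assoc, List.singleton_append]

theorem gctPass_eq (t : String × List String) (u : List (Int × (String × String)))
    (d : PySem.Dict Int String) :
    gctPass (d, u) t =
      ((u.filter (fun p => t.2.any (fun kw => PySem.Str.isIn kw p.2.2))).foldl
          (fun d p => d.insert p.1 t.1) d,
        u.filter (fun p => !t.2.any (fun kw => PySem.Str.isIn kw p.2.2))) := by
  have := gctPass_foldl t u d []
  simpa [gctPass] using this

-- lookup in a dict extended by same-value inserts over a list of keyed entries
theorem gct_getD_insert_fold (v : List (Int × (String × String))) (d : PySem.Dict Int String)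
    (nm : String) (i : Int) (dflt : String) :
    ((v.foldl (fun d p => d.insert p.1 nm) d).getD i dflt) =
      if i ∈ v.map (·.1) then nm else d.getD i dflt := by
  induction v generalizing d with
  | nil => simp
  | cons p rest ih =>
      rw [List.foldl_cons, ih]
      by_cases h : i ∈ rest.map (·.1)
      · simp [h]
      · simp only [List.map_cons, List.mem_cons, h, or_false]
        rw [PySem.Dict.getD_insert]
        by_cases hip : i = p.1 <;> simp [hip]

-- membership of p.1 in a filtered worklist determines the predicate at p (fst-nodup worklist)
theorem gct_mem_filter_map_fst {u : List (Int × (String × String))}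
    (hnd : (u.map (fun x => x.1)).Nodup) {p : Int × (String × String)} (hp : p ∈ u)
    (q : Int × (String × String) → Bool) :
    (p.1 ∈ (u.filter q).map (fun x => x.1)) ↔ q p = true := by
  constructor
  · intro h
    obtain ⟨p', hp', hfst⟩ := List.mem_map.mp h
    have hp'u : p' ∈ u := (List.mem_filter.mp hp').1
    have : p' = p := List.inj_on_of_nodup_map hnd hp'u hp hfst
    subst this
    exact (List.mem_filter.mp hp').2
  · intro h
    exact List.mem_map.mpr ⟨p, List.mem_filter.mpr ⟨hp, h⟩, rfl⟩

theorem gct_nodup_fst_enumerate (xs : List (String × String)) :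
    ((PySem.List.enumerate xs).map (fun x => x.1)).Nodup := by
  have h := PySem.List.pairwise_lt_enumerate xs 0
  have h2 : (PySem.List.enumerate xs 0).Pairwise (fun p q => p.1 ≠ q.1) :=
    h.imp (fun hlt => ne_of_lt hlt)
  exact (List.pairwise_map).mpr h2

-- the label dict built by the five passes computes the first-match classification
theorem gct_labels_eq (lines : List (String × String)) (p : Int × (String × String))
    (hp : p ∈ PySem.List.enumerate lines) :
    ((gctThemes.foldl gctPass (PySem.Dict.empty, PySem.List.enumerate lines)).1).getD p.1
        "Other Changes" = gctCls p.2.2 := by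
  have hnd := gct_nodup_fst_enumerate lines
  simp only [gctThemes, List.foldl_cons, List.foldl_nil]
  rw [gctPass_eq, gctPass_eq, gctPass_eq, gctPass_eq, gctPass_eq]
  rw [gct_getD_insert_fold, gct_getD_insert_fold, gct_getD_insert_fold,
    gct_getD_insert_fold, gct_getD_insert_fold]
  simp only [List.filter_filter]
  simp only [gct_mem_filter_map_fst hnd hp]
  simp only [gctCls]
  cases h1 : List.any ["fix", "bug", "error", "issue"] (fun kw => PySem.Str.isIn kw p.2.2) <;>
  cases h2 : List.any ["add", "new", "implement", "create"] (fun kw => PySem.Str.isIn kw p.2.2) <;>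
  cases h3 : List.any ["update", "change", "modify", "refactor"] (fun kw => PySem.Str.isIn kw p.2.2) <;>
  cases h4 : List.any ["doc", "readme", "comment"] (fun kw => PySem.Str.isIn kw p.2.2) <;>
  cases h5 : List.any ["test", "ci", "build"] (fun kw => PySem.Str.isIn kw p.2.2) <;>
  simp

theorem gctB_eq_CF (cm : List (String × List String)) :
    generate_commit_themes_alt cm = gctCF cm := by
  have h0 : generate_commit_themes_alt cm =
      ((PySem.List.enumerate (gctLines cm)).foldl
        (fun th p =>
          th.modify
            (((gctThemes.foldl gctPass
                (PySem.Dict.empty, PySem.List.enumerate (gctLines cm))).1).getD p.1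
              "Other Changes")
            [] (· ++ [p.2.1]))
        PySem.Dict.empty).items := rfl
  rw [h0]
  unfold gctCF
  congr 1
  rw [PySem.List.foldl_congr_mem _ _
      (fun th (p : Int × (String × String)) => th.modify (gctCls p.2.2) [] (· ++ [p.2.1])) _
      (fun acc p hp => by rw [gct_labels_eq (gctLines cm) p hp])]
  conv_rhs => rw [← PySem.List.map_snd_enumerate (gctLines cm) 0, List.foldl_map]

-- ===== VERDICT (by name: the statement is the Claim_ definition above) =====
theorem generate_commit_themes_spec : Claim_equal_generate_commit_themes := by
  intro cm _
  show _ = _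
  rw [gctA_eq_CF, gctB_eq_CF]
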